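-- pv_equiv track=rewrite | github.com/einioville/JukkaBot | src/jukkabot/openai_service.py | _is_quota_exhausted_message
-- ===== SOURCE A (Python) =====
-- def _is_quota_exhausted_message(message: str) -> bool:
--     lowered = message.casefold()
--     keywords = (
--         "insufficient_quota",
--         "insufficient quota",
--         "exceeded your current quota",
--         "billing",
--         "credit balance",
--         "out of credits",
--         "balance is exhausted",
--     )
--     return any(keyword in lowered for keyword in keywords)
-- ===== SOURCE B (Python) =====
-- _QUOTA_KEYWORDS = (
--     "insufficient_quota",
--     "insufficient quota",
--     "exceeded your current quota",
--     "billing",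
--     "credit balance",
--     "out of credits",
--     "balance is exhausted",
-- )
--
--
-- def _is_quota_exhausted_message(message: str) -> bool:
--     lowered = message.casefold()
--     for i in range(len(lowered) + 1):
--         if lowered.startswith(_QUOTA_KEYWORDS, i):
--             return True
--     return False
-- ===== Notes on version B (the rewrite author's own statement) =====
-- stated objective: alternative
-- what changed: Replaces seven independent 'keyword in lowered' substring scans with one left-to-right pass over the casefolded message, testing at each offset whether any keyword starts there via a single startswith call on a keyword tuple, returning at the first hit.
import Mathlib
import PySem

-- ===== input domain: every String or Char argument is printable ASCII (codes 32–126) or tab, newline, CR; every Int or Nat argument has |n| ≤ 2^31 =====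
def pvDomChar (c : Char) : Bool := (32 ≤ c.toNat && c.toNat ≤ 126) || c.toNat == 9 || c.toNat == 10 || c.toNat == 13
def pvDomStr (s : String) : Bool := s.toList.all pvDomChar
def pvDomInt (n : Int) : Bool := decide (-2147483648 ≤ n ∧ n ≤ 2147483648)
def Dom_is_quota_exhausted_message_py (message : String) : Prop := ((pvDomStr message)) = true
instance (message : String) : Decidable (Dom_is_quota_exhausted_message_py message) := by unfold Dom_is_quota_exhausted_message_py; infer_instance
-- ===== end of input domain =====

-- B replaces seven independent substring scans with one left-to-right scan testing all keywords at each offset (objective: alternative).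

-- ===== PORT A =====
-- the keyword tuple of A (also used, as the startswith tuple, by B)
def quotaKeywords : List (List Char) :=
  [ "insufficient_quota".toList,
    "insufficient quota".toList,
    "exceeded your current quota".toList,
    "billing".toList,
    "credit balance".toList,
    "out of credits".toList,
    "balance is exhausted".toList ]

def is_quota_exhausted_message_py (message : String) : Bool :=
  let lowered := PySem.Chars.lower message.toList
  quotaKeywords.any (fun keyword => PySem.Chars.isIn keyword lowered)

-- ===== PORT B =====
-- B's loop: at each successive offset (suffix), does some keyword start here?
def quotaScan (s : List Char) : Bool :=
  if quotaKeywords.any (fun k => PySem.Chars.startswith s k) then true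
  else
    match s with
    | [] => false
    | _ :: t => quotaScan t

def is_quota_exhausted_message_py_alt (message : String) : Bool :=
  quotaScan (PySem.Chars.lower message.toList)

-- ===== PRECONDITION & SPEC =====
def Spec_is_quota_exhausted_message_py (message : String) (out : Bool) : Prop := out = is_quota_exhausted_message_py_alt message
instance (message : String) (out : Bool) : Decidable (Spec_is_quota_exhausted_message_py message out) := by unfold Spec_is_quota_exhausted_message_py; infer_instance

-- ===== CLAIM (what is proved, stated in full; the proofs are below) =====
def Claim_equal_is_quota_exhausted_message_py : Prop := ∀ (message : String), Dom_is_quota_exhausted_message_py message → Spec_is_quota_exhausted_message_py message (is_quota_exhausted_message_py message)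

-- ===== LEMMAS AND PROOFS =====

-- B's scan finds exactly the keywords occurring as infixes of s (what A's 'in' tests)
theorem quotaScan_eq_any_isIn (s : List Char) :
    quotaScan s = quotaKeywords.any (fun k => PySem.Chars.isIn k s) := by
  induction s with
  | nil => decide
  | cons c t ih =>
    rw [quotaScan]
    by_cases h : quotaKeywords.any (fun k => PySem.Chars.startswith (c :: t) k) = true
    · rw [if_pos h]
      rcases List.any_eq_true.mp h with ⟨k, hk, hsw⟩
      have hin : PySem.Chars.isIn k (c :: t) = true :=
        (PySem.Chars.isIn_iff_infix k (c :: t)).mpr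
          ((PySem.Chars.startswith_iff (c :: t) k).mp hsw).isInfix
      exact (List.any_eq_true.mpr ⟨k, hk, hin⟩).symm
    · rw [if_neg h, ih]
      apply Bool.eq_iff_iff.mpr
      simp only [List.any_eq_true]
      constructor
      · rintro ⟨k, hk, hin⟩
        have hinf := (PySem.Chars.isIn_iff_infix k t).mp hin
        exact ⟨k, hk, (PySem.Chars.isIn_iff_infix k (c :: t)).mpr
          (List.infix_cons_iff.mpr (Or.inr hinf))⟩
      · rintro ⟨k, hk, hin⟩
        rcases List.infix_cons_iff.mp ((PySem.Chars.isIn_iff_infix k (c :: t)).mp hin) with hpre | hinf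
        · exact absurd (List.any_eq_true.mpr
            ⟨k, hk, (PySem.Chars.startswith_iff (c :: t) k).mpr hpre⟩) h
        · exact ⟨k, hk, (PySem.Chars.isIn_iff_infix k t).mpr hinf⟩

-- ===== VERDICT (by name: the statement is the Claim_ definition above) =====
theorem is_quota_exhausted_message_py_spec : Claim_equal_is_quota_exhausted_message_py := by
  intro message _
  unfold Spec_is_quota_exhausted_message_py is_quota_exhausted_message_py is_quota_exhausted_message_py_alt
  rw [quotaScan_eq_any_isIn]
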